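-- pv_equiv track=rewrite | github.com/mrinalpande/Text-Evaluation-System | Approach #2/ABTE.py | check
-- ===== SOURCE A (Python) =====
-- def check(inc, cor):
--     list1=['qwertyuiop','asdfghjkl','zxcvbnm']
--     i=0
--     j=0
--     while i<3:
--         while j<len(list1[i]):
--             if cor == list1[i][j]:
--                 if first_last(cor)==1:
--                     if inc==list1[i][j+1]:
--                         return 1
--                 elif first_last(cor)==2:
--                     if inc==list1[i][j-1]:
--                         return 1
--                 else:
--                     if inc==list1[i][j-1] or inc==list1[i][j+1]:
--                         return 1
--             j+=1
--         j=0
--         i+=1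
--     return 3
--
-- def first_last(cor):
--     list1=["qaz","plm"]
--     for j in range(3):
--         if cor==list1[0][j]:
--             return 1
--         elif cor==list1[1][j]:
--             return 2
--     return 0
-- ===== SOURCE B (Python) =====
-- _ROWS = ['qwertyuiop', 'asdfghjkl', 'zxcvbnm']
-- _PAIRS = set()
-- for _row in _ROWS:
--     for _k in range(len(_row) - 1):
--         _PAIRS.add((_row[_k], _row[_k + 1]))
--         _PAIRS.add((_row[_k + 1], _row[_k]))
--
-- def check(inc, cor):
--     return 1 if (cor, inc) in _PAIRS else 3
-- ===== Notes on version B (the rewrite author's own statement) =====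
-- stated objective: simpler
-- what changed: Replaces the nested row/column scan with locate-and-test-neighbours (plus the first_last boundary helper) by a precomputed set of all ordered adjacent keyboard pairs, so the body is a single membership test.
import Mathlib
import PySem

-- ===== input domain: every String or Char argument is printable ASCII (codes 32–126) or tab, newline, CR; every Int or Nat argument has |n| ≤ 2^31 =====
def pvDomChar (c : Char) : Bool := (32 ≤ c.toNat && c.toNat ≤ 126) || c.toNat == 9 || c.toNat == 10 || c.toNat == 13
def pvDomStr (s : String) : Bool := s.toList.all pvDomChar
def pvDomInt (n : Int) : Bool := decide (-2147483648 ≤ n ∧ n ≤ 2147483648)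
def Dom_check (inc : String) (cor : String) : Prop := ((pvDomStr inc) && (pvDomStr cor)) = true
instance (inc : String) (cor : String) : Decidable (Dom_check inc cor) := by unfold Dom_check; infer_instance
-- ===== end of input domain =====

-- B replaces the nested locate-and-test-neighbours scan by a precomputed set of
-- adjacent-key pairs and a single membership test (objective: simpler).


-- ===== PORT A =====
-- for j in range(3): if cor=="qaz"[j]: return 1 elif cor=="plm"[j]: return 2; return 0
-- (indices 0..2 are always in range of the 3-char literals, so the getD default is unreachable)
def flLoop (cor : String) : List Int → Int
  | [] => 0
  | j :: rest =>
    if cor = String.ofList [PySem.List.pyGetD "qaz".toList j ' '] then 1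
    else if cor = String.ofList [PySem.List.pyGetD "plm".toList j ' '] then 2
    else flLoop cor rest

def first_last (cor : String) : Int := flLoop cor (PySem.List.pyRange 0 3 1)

-- inc == row[k]: Python raises IndexError only when k = len(row); that index is never
-- evaluated by check (last-row characters all have first_last = 2), so 'none → false'
-- is an unreachable placeholder; negative k wraps exactly as Python via pyGet?.
def nbrEq (inc row : String) (k : Int) : Bool :=
  match PySem.Str.pyGet? row k with
  | some c => inc = String.ofList [c]
  | none => false

-- the inner 'while j < len(list1[i])' loop, early return as Option
def rowScan (inc cor row : String) : List (Int × Char) → Option Int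
  | [] => none
  | (j, c) :: rest =>
    if cor = String.ofList [c] then
      if first_last cor = 1 then
        if nbrEq inc row (j + 1) then some 1 else rowScan inc cor row rest
      else if first_last cor = 2 then
        if nbrEq inc row (j - 1) then some 1 else rowScan inc cor row rest
      else
        if nbrEq inc row (j - 1) || nbrEq inc row (j + 1) then some 1
        else rowScan inc cor row rest
    else rowScan inc cor row rest

-- the outer 'while i < 3' loop
def rowsScan (inc cor : String) : List String → Int
  | [] => 3
  | row :: rest =>
    match rowScan inc cor row (PySem.List.enumerate row.toList) with
    | some r => r
    | none => rowsScan inc cor rest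

def check (inc : String) (cor : String) : Int :=
  rowsScan inc cor ["qwertyuiop", "asdfghjkl", "zxcvbnm"]

-- ===== PORT B =====
def pvRows : List String := ["qwertyuiop", "asdfghjkl", "zxcvbnm"]

-- one-time table: for each row and each k, add both orderings of the adjacent pair
def pvPairs : PySem.Set (String × String) :=
  pvRows.foldl
    (fun s row =>
      (PySem.List.pyRange 0 (PySem.Str.len row - 1) 1).foldl
        (fun s k =>
          let a := String.ofList [PySem.List.pyGetD row.toList k ' ']
          let b := String.ofList [PySem.List.pyGetD row.toList (k + 1) ' ']
          PySem.Set.add (PySem.Set.add s (a, b)) (b, a))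
        s)
    PySem.Set.empty

def check_alt (inc : String) (cor : String) : Int :=
  if PySem.Set.contains pvPairs (cor, inc) then 1 else 3

-- ===== PRECONDITION & SPEC =====
def Spec_check (inc : String) (cor : String) (out : Int) : Prop := out = check_alt inc cor
instance (inc : String) (cor : String) (out : Int) : Decidable (Spec_check inc cor out) := by unfold Spec_check; infer_instance

-- ===== CLAIM (what is proved, stated in full; the proofs are below) =====
def Claim_equal_check : Prop := ∀ (inc : String) (cor : String), Dom_check inc cor → Spec_check inc cor (check inc cor)

-- ===== LEMMAS AND PROOFS =====

-- pvPairs evaluated: the 46 ordered adjacent pairs, in insertion order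
set_option maxRecDepth 10000 in
theorem hPairs : pvPairs = [("q", "w"), ("w", "q"), ("w", "e"), ("e", "w"), ("e", "r"), ("r", "e"), ("r", "t"), ("t", "r"), ("t", "y"), ("y", "t"), ("y", "u"), ("u", "y"), ("u", "i"), ("i", "u"), ("i", "o"), ("o", "i"), ("o", "p"), ("p", "o"), ("a", "s"), ("s", "a"), ("s", "d"), ("d", "s"), ("d", "f"), ("f", "d"), ("f", "g"), ("g", "f"), ("g", "h"), ("h", "g"), ("h", "j"), ("j", "h"), ("j", "k"), ("k", "j"), ("k", "l"), ("l", "k"), ("z", "x"), ("x", "z"), ("x", "c"), ("c", "x"), ("c", "v"), ("v", "c"), ("v", "b"), ("b", "v"), ("b", "n"), ("n", "b"), ("n", "m"), ("m", "n")] := by decide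

-- one lemma per letter: with cor concrete, both programs reduce to the same test on inc
theorem case_q (inc : String) : check inc "q" = check_alt inc "q" := by
  simp [check, check_alt, hPairs, rowsScan, rowScan, first_last, flLoop, nbrEq, PySem.List.enumerate, PySem.List.pyRange, PySem.List.pyGetD, PySem.Str.pyGet?, PySem.List.pyGet?, PySem.List.pyIdx?, List.range_succ, PySem.Set.contains]
  split_ifs <;> rfl

theorem case_w (inc : String) : check inc "w" = check_alt inc "w" := by
  simp [check, check_alt, hPairs, rowsScan, rowScan, first_last, flLoop, nbrEq, PySem.List.enumerate, PySem.List.pyRange, PySem.List.pyGetD, PySem.Str.pyGet?, PySem.List.pyGet?, PySem.List.pyIdx?, List.range_succ, PySem.Set.contains]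
  split_ifs <;> rfl

theorem case_e (inc : String) : check inc "e" = check_alt inc "e" := by
  simp [check, check_alt, hPairs, rowsScan, rowScan, first_last, flLoop, nbrEq, PySem.List.enumerate, PySem.List.pyRange, PySem.List.pyGetD, PySem.Str.pyGet?, PySem.List.pyGet?, PySem.List.pyIdx?, List.range_succ, PySem.Set.contains]
  split_ifs <;> rfl

theorem case_r (inc : String) : check inc "r" = check_alt inc "r" := by
  simp [check, check_alt, hPairs, rowsScan, rowScan, first_last, flLoop, nbrEq, PySem.List.enumerate, PySem.List.pyRange, PySem.List.pyGetD, PySem.Str.pyGet?, PySem.List.pyGet?, PySem.List.pyIdx?, List.range_succ, PySem.Set.contains]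
  split_ifs <;> rfl

theorem case_t (inc : String) : check inc "t" = check_alt inc "t" := by
  simp [check, check_alt, hPairs, rowsScan, rowScan, first_last, flLoop, nbrEq, PySem.List.enumerate, PySem.List.pyRange, PySem.List.pyGetD, PySem.Str.pyGet?, PySem.List.pyGet?, PySem.List.pyIdx?, List.range_succ, PySem.Set.contains]
  split_ifs <;> rfl

theorem case_y (inc : String) : check inc "y" = check_alt inc "y" := by
  simp [check, check_alt, hPairs, rowsScan, rowScan, first_last, flLoop, nbrEq, PySem.List.enumerate, PySem.List.pyRange, PySem.List.pyGetD, PySem.Str.pyGet?, PySem.List.pyGet?, PySem.List.pyIdx?, List.range_succ, PySem.Set.contains]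
  split_ifs <;> rfl

theorem case_u (inc : String) : check inc "u" = check_alt inc "u" := by
  simp [check, check_alt, hPairs, rowsScan, rowScan, first_last, flLoop, nbrEq, PySem.List.enumerate, PySem.List.pyRange, PySem.List.pyGetD, PySem.Str.pyGet?, PySem.List.pyGet?, PySem.List.pyIdx?, List.range_succ, PySem.Set.contains]
  split_ifs <;> rfl

theorem case_i (inc : String) : check inc "i" = check_alt inc "i" := by
  simp [check, check_alt, hPairs, rowsScan, rowScan, first_last, flLoop, nbrEq, PySem.List.enumerate, PySem.List.pyRange, PySem.List.pyGetD, PySem.Str.pyGet?, PySem.List.pyGet?, PySem.List.pyIdx?, List.range_succ, PySem.Set.contains]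
  split_ifs <;> rfl

theorem case_o (inc : String) : check inc "o" = check_alt inc "o" := by
  simp [check, check_alt, hPairs, rowsScan, rowScan, first_last, flLoop, nbrEq, PySem.List.enumerate, PySem.List.pyRange, PySem.List.pyGetD, PySem.Str.pyGet?, PySem.List.pyGet?, PySem.List.pyIdx?, List.range_succ, PySem.Set.contains]
  split_ifs <;> rfl

theorem case_p (inc : String) : check inc "p" = check_alt inc "p" := by
  simp [check, check_alt, hPairs, rowsScan, rowScan, first_last, flLoop, nbrEq, PySem.List.enumerate, PySem.List.pyRange, PySem.List.pyGetD, PySem.Str.pyGet?, PySem.List.pyGet?, PySem.List.pyIdx?, List.range_succ, PySem.Set.contains]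
  split_ifs <;> rfl

theorem case_a (inc : String) : check inc "a" = check_alt inc "a" := by
  simp [check, check_alt, hPairs, rowsScan, rowScan, first_last, flLoop, nbrEq, PySem.List.enumerate, PySem.List.pyRange, PySem.List.pyGetD, PySem.Str.pyGet?, PySem.List.pyGet?, PySem.List.pyIdx?, List.range_succ, PySem.Set.contains]
  split_ifs <;> rfl

theorem case_s (inc : String) : check inc "s" = check_alt inc "s" := by
  simp [check, check_alt, hPairs, rowsScan, rowScan, first_last, flLoop, nbrEq, PySem.List.enumerate, PySem.List.pyRange, PySem.List.pyGetD, PySem.Str.pyGet?, PySem.List.pyGet?, PySem.List.pyIdx?, List.range_succ, PySem.Set.contains]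
  split_ifs <;> rfl

theorem case_d (inc : String) : check inc "d" = check_alt inc "d" := by
  simp [check, check_alt, hPairs, rowsScan, rowScan, first_last, flLoop, nbrEq, PySem.List.enumerate, PySem.List.pyRange, PySem.List.pyGetD, PySem.Str.pyGet?, PySem.List.pyGet?, PySem.List.pyIdx?, List.range_succ, PySem.Set.contains]
  split_ifs <;> rfl

theorem case_f (inc : String) : check inc "f" = check_alt inc "f" := by
  simp [check, check_alt, hPairs, rowsScan, rowScan, first_last, flLoop, nbrEq, PySem.List.enumerate, PySem.List.pyRange, PySem.List.pyGetD, PySem.Str.pyGet?, PySem.List.pyGet?, PySem.List.pyIdx?, List.range_succ, PySem.Set.contains]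
  split_ifs <;> rfl

theorem case_g (inc : String) : check inc "g" = check_alt inc "g" := by
  simp [check, check_alt, hPairs, rowsScan, rowScan, first_last, flLoop, nbrEq, PySem.List.enumerate, PySem.List.pyRange, PySem.List.pyGetD, PySem.Str.pyGet?, PySem.List.pyGet?, PySem.List.pyIdx?, List.range_succ, PySem.Set.contains]
  split_ifs <;> rfl

theorem case_h (inc : String) : check inc "h" = check_alt inc "h" := by
  simp [check, check_alt, hPairs, rowsScan, rowScan, first_last, flLoop, nbrEq, PySem.List.enumerate, PySem.List.pyRange, PySem.List.pyGetD, PySem.Str.pyGet?, PySem.List.pyGet?, PySem.List.pyIdx?, List.range_succ, PySem.Set.contains]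
  split_ifs <;> rfl

theorem case_j (inc : String) : check inc "j" = check_alt inc "j" := by
  simp [check, check_alt, hPairs, rowsScan, rowScan, first_last, flLoop, nbrEq, PySem.List.enumerate, PySem.List.pyRange, PySem.List.pyGetD, PySem.Str.pyGet?, PySem.List.pyGet?, PySem.List.pyIdx?, List.range_succ, PySem.Set.contains]
  split_ifs <;> rfl

theorem case_k (inc : String) : check inc "k" = check_alt inc "k" := by
  simp [check, check_alt, hPairs, rowsScan, rowScan, first_last, flLoop, nbrEq, PySem.List.enumerate, PySem.List.pyRange, PySem.List.pyGetD, PySem.Str.pyGet?, PySem.List.pyGet?, PySem.List.pyIdx?, List.range_succ, PySem.Set.contains]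
  split_ifs <;> rfl

theorem case_l (inc : String) : check inc "l" = check_alt inc "l" := by
  simp [check, check_alt, hPairs, rowsScan, rowScan, first_last, flLoop, nbrEq, PySem.List.enumerate, PySem.List.pyRange, PySem.List.pyGetD, PySem.Str.pyGet?, PySem.List.pyGet?, PySem.List.pyIdx?, List.range_succ, PySem.Set.contains]
  split_ifs <;> rfl

theorem case_z (inc : String) : check inc "z" = check_alt inc "z" := by
  simp [check, check_alt, hPairs, rowsScan, rowScan, first_last, flLoop, nbrEq, PySem.List.enumerate, PySem.List.pyRange, PySem.List.pyGetD, PySem.Str.pyGet?, PySem.List.pyGet?, PySem.List.pyIdx?, List.range_succ, PySem.Set.contains]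
  split_ifs <;> rfl

theorem case_x (inc : String) : check inc "x" = check_alt inc "x" := by
  simp [check, check_alt, hPairs, rowsScan, rowScan, first_last, flLoop, nbrEq, PySem.List.enumerate, PySem.List.pyRange, PySem.List.pyGetD, PySem.Str.pyGet?, PySem.List.pyGet?, PySem.List.pyIdx?, List.range_succ, PySem.Set.contains]
  split_ifs <;> rfl

theorem case_c (inc : String) : check inc "c" = check_alt inc "c" := by
  simp [check, check_alt, hPairs, rowsScan, rowScan, first_last, flLoop, nbrEq, PySem.List.enumerate, PySem.List.pyRange, PySem.List.pyGetD, PySem.Str.pyGet?, PySem.List.pyGet?, PySem.List.pyIdx?, List.range_succ, PySem.Set.contains]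
  split_ifs <;> rfl

theorem case_v (inc : String) : check inc "v" = check_alt inc "v" := by
  simp [check, check_alt, hPairs, rowsScan, rowScan, first_last, flLoop, nbrEq, PySem.List.enumerate, PySem.List.pyRange, PySem.List.pyGetD, PySem.Str.pyGet?, PySem.List.pyGet?, PySem.List.pyIdx?, List.range_succ, PySem.Set.contains]
  split_ifs <;> rfl

theorem case_b (inc : String) : check inc "b" = check_alt inc "b" := by
  simp [check, check_alt, hPairs, rowsScan, rowScan, first_last, flLoop, nbrEq, PySem.List.enumerate, PySem.List.pyRange, PySem.List.pyGetD, PySem.Str.pyGet?, PySem.List.pyGet?, PySem.List.pyIdx?, List.range_succ, PySem.Set.contains]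
  split_ifs <;> rfl

theorem case_n (inc : String) : check inc "n" = check_alt inc "n" := by
  simp [check, check_alt, hPairs, rowsScan, rowScan, first_last, flLoop, nbrEq, PySem.List.enumerate, PySem.List.pyRange, PySem.List.pyGetD, PySem.Str.pyGet?, PySem.List.pyGet?, PySem.List.pyIdx?, List.range_succ, PySem.Set.contains]
  split_ifs <;> rfl

theorem case_m (inc : String) : check inc "m" = check_alt inc "m" := by
  simp [check, check_alt, hPairs, rowsScan, rowScan, first_last, flLoop, nbrEq, PySem.List.enumerate, PySem.List.pyRange, PySem.List.pyGetD, PySem.Str.pyGet?, PySem.List.pyGet?, PySem.List.pyIdx?, List.range_succ, PySem.Set.contains]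
  split_ifs <;> rfl

-- cor equal to no letter: A's scan never matches and B's pair lookup fails, both give 3
theorem case_other (inc cor : String) (h0 : cor ≠ "q") (h1 : cor ≠ "w") (h2 : cor ≠ "e") (h3 : cor ≠ "r") (h4 : cor ≠ "t") (h5 : cor ≠ "y") (h6 : cor ≠ "u") (h7 : cor ≠ "i") (h8 : cor ≠ "o") (h9 : cor ≠ "p") (h10 : cor ≠ "a") (h11 : cor ≠ "s") (h12 : cor ≠ "d") (h13 : cor ≠ "f") (h14 : cor ≠ "g") (h15 : cor ≠ "h") (h16 : cor ≠ "j") (h17 : cor ≠ "k") (h18 : cor ≠ "l") (h19 : cor ≠ "z") (h20 : cor ≠ "x") (h21 : cor ≠ "c") (h22 : cor ≠ "v") (h23 : cor ≠ "b") (h24 : cor ≠ "n") (h25 : cor ≠ "m") : check inc cor = check_alt inc cor := by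
  simp [check, check_alt, hPairs, rowsScan, rowScan, PySem.List.enumerate, PySem.Set.contains, h0, h1, h2, h3, h4, h5, h6, h7, h8, h9, h10, h11, h12, h13, h14, h15, h16, h17, h18, h19, h20, h21, h22, h23, h24, h25]

-- ===== VERDICT (by name: the statement is the Claim_ definition above) =====
theorem check_spec : Claim_equal_check := by
  intro inc cor _
  unfold Spec_check
  by_cases h0 : cor = "q"
  · subst h0; exact case_q inc
  by_cases h1 : cor = "w"
  · subst h1; exact case_w inc
  by_cases h2 : cor = "e"
  · subst h2; exact case_e inc
  by_cases h3 : cor = "r"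
  · subst h3; exact case_r inc
  by_cases h4 : cor = "t"
  · subst h4; exact case_t inc
  by_cases h5 : cor = "y"
  · subst h5; exact case_y inc
  by_cases h6 : cor = "u"
  · subst h6; exact case_u inc
  by_cases h7 : cor = "i"
  · subst h7; exact case_i inc
  by_cases h8 : cor = "o"
  · subst h8; exact case_o inc
  by_cases h9 : cor = "p"
  · subst h9; exact case_p inc
  by_cases h10 : cor = "a"
  · subst h10; exact case_a inc
  by_cases h11 : cor = "s"
  · subst h11; exact case_s inc
  by_cases h12 : cor = "d"
  · subst h12; exact case_d inc
  by_cases h13 : cor = "f"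
  · subst h13; exact case_f inc
  by_cases h14 : cor = "g"
  · subst h14; exact case_g inc
  by_cases h15 : cor = "h"
  · subst h15; exact case_h inc
  by_cases h16 : cor = "j"
  · subst h16; exact case_j inc
  by_cases h17 : cor = "k"
  · subst h17; exact case_k inc
  by_cases h18 : cor = "l"
  · subst h18; exact case_l inc
  by_cases h19 : cor = "z"
  · subst h19; exact case_z inc
  by_cases h20 : cor = "x"
  · subst h20; exact case_x inc
  by_cases h21 : cor = "c"
  · subst h21; exact case_c inc
  by_cases h22 : cor = "v"
  · subst h22; exact case_v inc
  by_cases h23 : cor = "b"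
  · subst h23; exact case_b inc
  by_cases h24 : cor = "n"
  · subst h24; exact case_n inc
  by_cases h25 : cor = "m"
  · subst h25; exact case_m inc
  exact case_other inc cor h0 h1 h2 h3 h4 h5 h6 h7 h8 h9 h10 h11 h12 h13 h14 h15 h16 h17 h18 h19 h20 h21 h22 h23 h24 h25
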